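-- pv_equiv track=rewrite | github.com/ThatOtherAndrew/AdventOfCode2023 | 11/part_2.py | get_galaxy_distance
-- ===== SOURCE A (Python) =====
-- def get_galaxy_distance(
--     blank_rows: set[int],
--     blank_columns: set[int],
--     start: tuple[int, int],
--     end: tuple[int, int]
-- ) -> int:
--     distance = 0
--     for i, line in enumerate((blank_rows, blank_columns)):
--         distance += sum(1_000_000 if index in line else 1 for index in range(*sorted((start[i], end[i]))))
--     return distance
-- ===== SOURCE B (Python) =====
-- def get_galaxy_distance(
--     blank_rows: set[int],
--     blank_columns: set[int],
--     start: tuple[int, int],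
--     end: tuple[int, int]
-- ) -> int:
--     # Closed form: distance along an axis = span + 999_999 * (number of blank
--     # lines inside the half-open interval), counted by scanning the blank set
--     # instead of walking every coordinate in the span.
--     total = 0
--     for blanks, a, b in ((blank_rows, start[0], end[0]), (blank_columns, start[1], end[1])):
--         lo, hi = min(a, b), max(a, b)
--         total += (hi - lo) + 999_999 * sum(1 for x in blanks if lo <= x < hi)
--     return total
-- ===== Notes on version B (the rewrite author's own statement) =====
-- stated objective: alternative
-- what changed: Instead of iterating over every coordinate in the span and adding 1 or 1_000_000 per step, B computes each axis in closed form as span + 999999 * (count of blanks inside the interval), scanning only the blank set.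
import Mathlib
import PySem

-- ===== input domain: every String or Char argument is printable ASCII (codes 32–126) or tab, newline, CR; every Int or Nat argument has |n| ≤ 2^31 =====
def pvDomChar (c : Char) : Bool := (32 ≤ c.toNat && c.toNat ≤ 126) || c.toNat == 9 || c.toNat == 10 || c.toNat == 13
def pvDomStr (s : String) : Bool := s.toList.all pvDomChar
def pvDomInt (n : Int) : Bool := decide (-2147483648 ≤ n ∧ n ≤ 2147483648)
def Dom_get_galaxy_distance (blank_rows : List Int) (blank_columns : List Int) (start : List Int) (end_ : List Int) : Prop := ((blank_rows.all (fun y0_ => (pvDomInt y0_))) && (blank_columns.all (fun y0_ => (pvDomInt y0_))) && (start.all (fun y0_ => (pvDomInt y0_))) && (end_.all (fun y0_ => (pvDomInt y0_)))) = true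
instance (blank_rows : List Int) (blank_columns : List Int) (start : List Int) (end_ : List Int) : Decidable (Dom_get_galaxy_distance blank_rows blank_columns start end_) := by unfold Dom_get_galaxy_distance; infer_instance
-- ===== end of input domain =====

-- B replaces A's per-coordinate walk over the span by the closed form
-- span + 999999 * (blanks inside the interval), scanning only the blank set
-- (an alternative algorithm; equality of the return values is what is proved).

-- ===== PORT A =====
def get_galaxy_distance (blank_rows : List Int) (blank_columns : List Int) (start : List Int) (end_ : List Int) : Int :=
  -- distance = 0; for i, line in enumerate((blank_rows, blank_columns)): distance += sum(...)
  (PySem.List.enumerate [blank_rows, blank_columns] 0).foldl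
    (fun distance p =>
      let i := p.1
      let line := p.2
      let bounds := PySem.List.sorted [PySem.List.pyGetD start i 0, PySem.List.pyGetD end_ i 0] (fun x => x) false
      distance +
        (PySem.List.pyRange (PySem.List.pyGetD bounds 0 0) (PySem.List.pyGetD bounds 1 0) 1).foldl
          (fun acc index => acc + if index ∈ line then (1000000 : Int) else 1) 0)
    0

-- ===== PORT B =====
def pvAxisDistance (blanks : List Int) (a b : Int) : Int :=
  let lo := min a b
  let hi := max a b
  (hi - lo) + 999999 * (blanks.countP (fun x => decide (lo ≤ x ∧ x < hi)) : Int)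

def get_galaxy_distance_alt (blank_rows : List Int) (blank_columns : List Int) (start : List Int) (end_ : List Int) : Int :=
  0 + pvAxisDistance blank_rows (PySem.List.pyGetD start 0 0) (PySem.List.pyGetD end_ 0 0)
    + pvAxisDistance blank_columns (PySem.List.pyGetD start 1 0) (PySem.List.pyGetD end_ 1 0)

-- ===== PRECONDITION & SPEC =====
-- Pre_ excludes inputs where the Python A raises IndexError (start/end shorter than 2),
-- and requires the blank lists to be duplicate-free, since they port Python set[int] values.
def Pre_get_galaxy_distance (blank_rows : List Int) (blank_columns : List Int) (start : List Int) (end_ : List Int) : Prop :=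
  2 ≤ start.length ∧ 2 ≤ end_.length ∧ blank_rows.Nodup ∧ blank_columns.Nodup
instance (blank_rows : List Int) (blank_columns : List Int) (start : List Int) (end_ : List Int) : Decidable (Pre_get_galaxy_distance blank_rows blank_columns start end_) := by unfold Pre_get_galaxy_distance; infer_instance

def pvWitness_get_galaxy_distance : List Int × List Int × List Int × List Int := ([2, 5], [3], [0, 1], [7, 6])

def Spec_get_galaxy_distance (blank_rows : List Int) (blank_columns : List Int) (start : List Int) (end_ : List Int) (out : Int) : Prop := out = get_galaxy_distance_alt blank_rows blank_columns start end_
instance (blank_rows : List Int) (blank_columns : List Int) (start : List Int) (end_ : List Int) (out : Int) : Decidable (Spec_get_galaxy_distance blank_rows blank_columns start end_ out) := by unfold Spec_get_galaxy_distance; infer_instance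

-- ===== CLAIM (what is proved, stated in full; the proofs are below) =====
def Claim_equal_get_galaxy_distance : Prop := ∀ (blank_rows : List Int) (blank_columns : List Int) (start : List Int) (end_ : List Int), Dom_get_galaxy_distance blank_rows blank_columns start end_ → Pre_get_galaxy_distance blank_rows blank_columns start end_ → Spec_get_galaxy_distance blank_rows blank_columns start end_ (get_galaxy_distance blank_rows blank_columns start end_)

-- ===== LEMMAS AND PROOFS =====

-- sorted of a two-element list
lemma sorted_pair (a b : Int) :
    PySem.List.sorted [a, b] (fun x => x) false = if a ≤ b then [a, b] else [b, a] := by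
  split_ifs with h
  · exact PySem.List.sorted_id_eq_of_perm_of_pairwise [a, b] [a, b] (List.Perm.refl _) (by simp [h])
  · exact PySem.List.sorted_id_eq_of_perm_of_pairwise [a, b] [b, a] (List.Perm.swap _ _ _)
      (by simp [le_of_lt (lt_of_not_ge h)])

-- sum(generator) as a fold equals the map-sum
lemma foldl_add_eq_sum_map (f : Int → Int) : ∀ (l : List Int) (c : Int),
    l.foldl (fun acc x => acc + f x) c = c + (l.map f).sum
  | [], c => by simp
  | x :: l, c => by
    simp [foldl_add_eq_sum_map f l (c + f x)]
    ring

-- the per-coordinate sum is length + 999999 * count of members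
lemma sum_map_ite_mem (S : List Int) : ∀ (l : List Int),
    (l.map (fun i => if i ∈ S then (1000000 : Int) else 1)).sum
      = (l.length : Int) + 999999 * (l.countP (fun i => decide (i ∈ S)) : Int)
  | [] => by simp
  | x :: l => by
    have ih := sum_map_ite_mem S l
    by_cases h : x ∈ S <;> simp [h, ih] <;> omega

-- counting range members of S = counting S members of the interval (both sides Nodup)
lemma countP_range_eq_countP (S : List Int) (hS : S.Nodup) (lo hi : Int) :
    (PySem.List.pyRange lo hi 1).countP (fun i => decide (i ∈ S))
      = S.countP (fun x => decide (lo ≤ x ∧ x < hi)) := by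
  rw [List.countP_eq_length_filter, List.countP_eq_length_filter]
  apply List.Perm.length_eq
  apply (List.perm_ext_iff_of_nodup (List.Nodup.filter _ (PySem.List.nodup_pyRange_one lo hi))
    (List.Nodup.filter _ hS)).2
  intro x
  simp [List.mem_filter, PySem.List.mem_pyRange_one, and_comm]

-- the A-side axis sum equals pvAxisDistance
lemma axis_eq (S : List Int) (hS : S.Nodup) (a b : Int) :
    (let bounds := PySem.List.sorted [a, b] (fun x => x) false
     (PySem.List.pyRange (PySem.List.pyGetD bounds 0 0) (PySem.List.pyGetD bounds 1 0) 1).foldl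
        (fun acc index => acc + if index ∈ S then (1000000 : Int) else 1) 0)
      = pvAxisDistance S a b := by
  simp only [foldl_add_eq_sum_map, zero_add]
  rw [sorted_pair]
  by_cases h : a ≤ b
  · simp only [if_pos h]
    have h0 : PySem.List.pyGetD [a, b] 0 0 = a := by
      simp [PySem.List.pyGetD, PySem.List.pyGet?, PySem.List.pyIdx?]
    have h1 : PySem.List.pyGetD [a, b] 1 0 = b := by
      simp [PySem.List.pyGetD, PySem.List.pyGet?, PySem.List.pyIdx?]
    rw [h0, h1, sum_map_ite_mem, countP_range_eq_countP S hS, PySem.List.length_pyRange_one]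
    simp only [pvAxisDistance, min_eq_left h, max_eq_right h]
    omega
  · have h' : b ≤ a := le_of_lt (lt_of_not_ge h)
    simp only [if_neg h]
    have h0 : PySem.List.pyGetD [b, a] 0 0 = b := by
      simp [PySem.List.pyGetD, PySem.List.pyGet?, PySem.List.pyIdx?]
    have h1 : PySem.List.pyGetD [b, a] 1 0 = a := by
      simp [PySem.List.pyGetD, PySem.List.pyGet?, PySem.List.pyIdx?]
    rw [h0, h1, sum_map_ite_mem, countP_range_eq_countP S hS, PySem.List.length_pyRange_one]
    simp only [pvAxisDistance, min_eq_right h', max_eq_left h']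
    omega

-- ===== VERDICT (by name: the statement is the Claim_ definition above) =====
theorem get_galaxy_distance_spec : Claim_equal_get_galaxy_distance := by
  intro br bc s e _ hpre
  obtain ⟨hs, he, hbr, hbc⟩ := hpre
  unfold Spec_get_galaxy_distance get_galaxy_distance get_galaxy_distance_alt
  simp only [PySem.List.enumerate_cons, PySem.List.enumerate_nil, List.foldl]
  rw [axis_eq br hbr, axis_eq bc hbc]
  norm_num
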